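-- pv_equiv track=rewrite | github.com/andreimaximov/algorithms | algorithms/dynamic-programming/summing-pieces/solution.py | pieces
-- ===== SOURCE A (Python) =====
-- MOD = 1000000007
--
-- def mul(a, b):
--     """Returns the modulo multiplication of a and b."""
--     return (a * b) % MOD
--
-- def add(a, b):
--     """Returns the module sum of a and b."""
--     return (a + b) % MOD
--
-- def pieces(A):
--     """Calculates the sum of all B that form A in O(n) time and O(1) space.
--
--     We build the solution from a base case when len(A) = 1 and continuously
--     append A[i] to the result computed for each A[0...i - 1]. We use the
--     following 4 variables.
--
--     x(i) = The solution for A[0...i]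
--     y(i) = The number of unique arrangements of pieces that form A[0...i]
--     s(i) = The set of suffix pieces across all unique arrangements that form
--            A[0...i]
--     k(i) = The sum of lengths of all s(i)
--     m(i) = The sum of values in all s(i)
--
--     Call dp(i) = (x(i), y(i), k(i), m(i))
--
--     For n = 1 we say dp(0) = (A[0], 1, 1, A[0]). Now, how do we go from dp(i)
--     to dp(i + 1)?
--
--     There are two ways we can append A[i + 1] to the solution for A[0...i].
--
--     1) We can append another piece (A[i + 1]) to all combinations of pieces
--     that formed A[0...i].
--
--     2) Or we can append A[i + 1] to the suffix pieces that formed A[0...i].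
--
--     To calculate x(i + 1) from x(i) we also need k(i) and m(i). See code
--     comments for details on how to handle each case.
--
--     Lastly, each time we are doubling the number of unique piece combinations
--     that form A[i...n] so y(i + 1) = 2 * y(i).
--
--     Args:
--         A (List[int])
--
--     Returns:
--         int
--     """
--     n = len(A)
--     if n == 0:
--         return 0
--
--     # DP represents the 4 variables x, y, z, a for each i
--     dp = A[0], 1, 1, A[0]
--
--     for i in range(1, n):
--         last_x, last_y, last_k, last_m = dp
--
--         # Case 1 - Append a piece (A[i])
--         exc_x = add(last_x, mul(A[i], last_y))
--
--         # Case 2 - The essence here is that existing suffix pieces increase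
--         # in length by one which affects by how much A[i] is factored in and
--         # that the value of each piece increases by m(i).
--         inc_x = add(last_x,
--                     add(last_m,  # Prefix piece increases in value my m(i + 1)
--                         mul(A[i], add(last_k, last_y))))  # Factor in A[i]
--         x = add(exc_x, inc_x)
--
--         # Double combinations
--         y = mul(last_y, 2)
--
--         # k(i) = k(i + 1) + y(i + 1) * 2 = k(i + 1) + y(i)
--         k = add(last_k, y)
--
--         # m(i) = A[i] * y(i) + m(i + 1)
--         m = add(mul(A[i], y), last_m)
--
--         dp = x, y, k, m
--
--     # Return x(0)
--     return dp[0]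
-- ===== SOURCE B (Python) =====
-- MOD = 1000000007
--
-- def pieces(A):
--     n = len(A)
--     if n == 1:
--         return A[0]
--     # pw[t] = 2^t mod MOD for t = 0..n
--     pw = [1]
--     for _ in range(n):
--         pw.append(pw[-1] * 2 % MOD)
--     total = 0
--     for j in range(n):
--         total += A[j] * (pw[n] + pw[n - 1] - pw[n - 1 - j] - pw[j])
--     return total % MOD
-- ===== Notes on version B (the rewrite author's own statement) =====
-- stated objective: faster
-- what changed: Replaces A's four-variable DP recurrence (x, y, k, m updated with many modular add/mul calls per element) by a closed-form per-index coefficient: answer = sum of A[j] * (2^n + 2^(n-1) - 2^(n-1-j) - 2^j) mod 1000000007, computed in one pass over a precomputed power-of-two table; fewer modular operations per element give a constant-factor speedup.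
import Mathlib
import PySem

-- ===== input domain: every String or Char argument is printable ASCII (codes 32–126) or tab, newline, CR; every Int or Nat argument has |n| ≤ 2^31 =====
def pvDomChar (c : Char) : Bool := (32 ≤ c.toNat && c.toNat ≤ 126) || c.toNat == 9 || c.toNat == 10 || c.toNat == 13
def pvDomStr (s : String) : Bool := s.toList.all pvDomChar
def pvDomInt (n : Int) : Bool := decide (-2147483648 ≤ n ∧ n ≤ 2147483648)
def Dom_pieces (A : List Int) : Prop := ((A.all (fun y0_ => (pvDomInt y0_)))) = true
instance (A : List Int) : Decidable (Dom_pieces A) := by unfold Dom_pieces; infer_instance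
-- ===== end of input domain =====

-- B replaces A's four-variable DP by the closed-form coefficient 2^n + 2^(n-1) - 2^(n-1-j) - 2^j of
-- each A[j], summed in one pass over precomputed powers of two (objective: faster by a constant factor).

-- ===== PORT A =====
def pvMOD : Int := 1000000007

-- Python helper `mul(a, b)`
def pvMul (a b : Int) : Int := PySem.Int.mod (a * b) pvMOD

-- Python helper `add(a, b)`
def pvAdd (a b : Int) : Int := PySem.Int.mod (a + b) pvMOD

def pieces (A : List Int) : Int :=
  let n : Int := (A.length : Int)
  if n == 0 then 0
  else
    let dp : Int × Int × Int × Int := (PySem.List.pyGetD A 0 0, 1, 1, PySem.List.pyGetD A 0 0)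
    let dp := (PySem.List.pyRange 1 n).foldl (fun dp i =>
      let last_x := dp.1
      let last_y := dp.2.1
      let last_k := dp.2.2.1
      let last_m := dp.2.2.2
      let ai := PySem.List.pyGetD A i 0
      -- Case 1 - Append a piece (A[i])
      let exc_x := pvAdd last_x (pvMul ai last_y)
      -- Case 2 - extend the suffix pieces
      let inc_x := pvAdd last_x (pvAdd last_m (pvMul ai (pvAdd last_k last_y)))
      let x := pvAdd exc_x inc_x
      let y := pvMul last_y 2
      let k := pvAdd last_k y
      let m := pvAdd (pvMul ai y) last_m
      (x, y, k, m)) dp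
    dp.1

-- ===== PORT B =====
def pieces_alt (A : List Int) : Int :=
  let n : Int := (A.length : Int)
  if n == 1 then PySem.List.pyGetD A 0 0
  else
    -- pw[t] = 2^t mod MOD for t = 0..n
    let pw : List Int := (PySem.List.pyRange 0 n).foldl
      (fun pw _ => pw ++ [PySem.Int.mod (PySem.List.pyGetD pw (-1) 0 * 2) pvMOD]) [1]
    let total : Int := (PySem.List.pyRange 0 n).foldl (fun total j =>
      total + PySem.List.pyGetD A j 0 *
        (PySem.List.pyGetD pw n 0 + PySem.List.pyGetD pw (n - 1) 0
          - PySem.List.pyGetD pw (n - 1 - j) 0 - PySem.List.pyGetD pw j 0)) 0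
    PySem.Int.mod total pvMOD

-- ===== PRECONDITION & SPEC =====
def Spec_pieces (A : List Int) (out : Int) : Prop := out = pieces_alt A
instance (A : List Int) (out : Int) : Decidable (Spec_pieces A out) := by unfold Spec_pieces; infer_instance

-- ===== CLAIM (what is proved, stated in full; the proofs are below) =====
def Claim_equal_pieces : Prop := ∀ (A : List Int), Dom_pieces A → Spec_pieces A (pieces A)

-- ===== LEMMAS AND PROOFS =====

-- the closed-form coefficient of A[j] in the answer for a length-n array
def pvC (n j : Nat) : Int := 2 ^ n + 2 ^ (n - 1) - 2 ^ (n - 1 - j) - 2 ^ j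

-- raw (un-reduced) value of x(m-1), the answer for the first m elements
def pvSx (A : List Int) (m : Nat) : Int :=
  ((List.range m).map (fun j => A.getD j 0 * pvC m j)).sum

-- raw value of m(m-1): sum of A[j] * 2^j over the first m elements
def pvSm (A : List Int) (m : Nat) : Int :=
  ((List.range m).map (fun j => A.getD j 0 * 2 ^ j)).sum

lemma pvMOD_pos : (0 : Int) < pvMOD := by norm_num [pvMOD]

lemma pvAdd_eq (a b : Int) : pvAdd a b = (a + b) % pvMOD :=
  PySem.Int.mod_eq_emod_of_pos pvMOD_pos

lemma pvMul_eq (a b : Int) : pvMul a b = (a * b) % pvMOD :=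
  PySem.Int.mod_eq_emod_of_pos pvMOD_pos

-- congruence toolkit: a % MOD â¡ a, and pvAdd/pvMul respect congruences
lemma pvR (a : Int) : Int.ModEq pvMOD (a % pvMOD) a := Int.emod_emod_of_dvd a dvd_rfl

lemma pvA {a b a' b' : Int} (ha : Int.ModEq pvMOD a a') (hb : Int.ModEq pvMOD b b') :
    Int.ModEq pvMOD (pvAdd a b) (a' + b') := by
  rw [pvAdd_eq]; exact (pvR _).trans (ha.add hb)

lemma pvM {a b a' b' : Int} (ha : Int.ModEq pvMOD a a') (hb : Int.ModEq pvMOD b b') :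
    Int.ModEq pvMOD (pvMul a b) (a' * b') := by
  rw [pvMul_eq]; exact (pvR _).trans (ha.mul hb)

lemma pvA_out {a b r : Int} (h : Int.ModEq pvMOD (a + b) r) : pvAdd a b = r % pvMOD := by
  rw [pvAdd_eq]; exact h

lemma pvM_out {a b r : Int} (h : Int.ModEq pvMOD (a * b) r) : pvMul a b = r % pvMOD := by
  rw [pvMul_eq]; exact h

lemma pvC_step (m j : Nat) (h : j < m) : pvC (m + 1) j = 2 * pvC m j + 2 ^ j := by
  obtain ⟨p, rfl⟩ : ∃ p, m = p + 1 := ⟨m - 1, by omega⟩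
  unfold pvC
  simp only [Nat.add_sub_cancel]
  rw [show p + 1 - j = (p - j) + 1 from by omega]
  ring

lemma pvSm_succ (A : List Int) (m : Nat) :
    pvSm A (m + 1) = pvSm A m + A.getD m 0 * 2 ^ m := by
  unfold pvSm
  rw [List.range_succ, List.map_append, List.sum_append]
  simp

lemma pvSx_succ (A : List Int) (t : Nat) :
    pvSx A (t + 2) = 2 * pvSx A (t + 1) + pvSm A (t + 1) + A.getD (t + 1) 0 * (2 ^ (t + 2) - 1) := by
  unfold pvSx pvSm
  rw [show t + 2 = (t + 1) + 1 from rfl, List.range_succ, List.map_append, List.sum_append]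
  have hc : pvC (t + 1 + 1) (t + 1) = 2 ^ (t + 2) - 1 := by
    unfold pvC
    simp only [Nat.add_sub_cancel]
    rw [show t + 1 - (t + 1) = 0 from by omega]
    ring
  have hmap : (List.range (t + 1)).map (fun j => A.getD j 0 * pvC (t + 1 + 1) j)
      = (List.range (t + 1)).map (fun j => 2 * (A.getD j 0 * pvC (t + 1) j) + A.getD j 0 * 2 ^ j) := by
    apply List.map_congr_left
    intro j hj
    rw [pvC_step (t + 1) j (List.mem_range.mp hj)]
    ring
  rw [hmap]
  simp only [List.map_cons, List.map_nil, List.sum_cons, List.sum_nil]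
  rw [hc, PySem.List.sum_map_add_int, List.sum_map_mul_left]
  ring

lemma pvSx_two (A : List Int) : pvSx A 2 = 3 * A.getD 0 0 + 3 * A.getD 1 0 := by
  unfold pvSx
  simp [List.range_succ, pvC]
  ring

lemma pvSm_two (A : List Int) : pvSm A 2 = A.getD 0 0 + A.getD 1 0 * 2 := by
  unfold pvSm
  simp [List.range_succ]

lemma pvSx_succ' (A : List Int) (t : Nat) :
    pvSx A (t + 3) = 2 * pvSx A (t + 2) + pvSm A (t + 2) + A.getD (t + 2) 0 * (2 ^ (t + 3) - 1) :=
  pvSx_succ A (t + 1)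

lemma pvSm_succ' (A : List Int) (t : Nat) :
    pvSm A (t + 3) = pvSm A (t + 2) + A.getD (t + 2) 0 * 2 ^ (t + 2) :=
  pvSm_succ A (t + 2)

lemma loopA_inv (A : List Int) (t : Nat) :
    (PySem.List.pyRange 1 ((t + 2 : Nat) : Int)).foldl (fun dp i =>
      let last_x := dp.1
      let last_y := dp.2.1
      let last_k := dp.2.2.1
      let last_m := dp.2.2.2
      let ai := PySem.List.pyGetD A i 0
      let exc_x := pvAdd last_x (pvMul ai last_y)
      let inc_x := pvAdd last_x (pvAdd last_m (pvMul ai (pvAdd last_k last_y)))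
      let x := pvAdd exc_x inc_x
      let y := pvMul last_y 2
      let k := pvAdd last_k y
      let m := pvAdd (pvMul ai y) last_m
      (x, y, k, m)) (PySem.List.pyGetD A 0 0, 1, 1, PySem.List.pyGetD A 0 0)
    = (pvSx A (t + 2) % pvMOD, 2 ^ (t + 1) % pvMOD, (2 ^ (t + 2) - 1) % pvMOD, pvSm A (t + 2) % pvMOD) := by
  induction t with
  | zero =>
      have hr : PySem.List.pyRange 1 ((0 + 2 : Nat) : Int) = [1] := by decide
      rw [hr]
      simp only [List.foldl_cons, List.foldl_nil, PySem.List.pyGetD_ofNat']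
      simp only [Prod.mk.injEq]
      refine ⟨?_, ?_, ?_, ?_⟩
      · apply pvA_out
        rw [show pvSx A (0 + 2) = (A.getD 0 0 + A.getD 1 0 * 1)
              + (A.getD 0 0 + (A.getD 0 0 + A.getD 1 0 * (1 + 1))) from by
            rw [show (0 + 2 : Nat) = 2 from rfl, pvSx_two]; ring]
        exact (Int.ModEq.add (pvA (Int.ModEq.refl _) (pvM (Int.ModEq.refl _) (Int.ModEq.refl _)))
          (pvA (Int.ModEq.refl _) (pvA (Int.ModEq.refl _)
            (pvM (Int.ModEq.refl _) (pvA (Int.ModEq.refl _) (Int.ModEq.refl _))))))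
      · apply pvM_out
        rw [show (2 : Int) ^ (0 + 1) = 1 * 2 from by norm_num]
      · apply pvA_out
        rw [show (2 : Int) ^ (0 + 2) - 1 = 1 + 1 * 2 from by norm_num]
        exact (Int.ModEq.refl 1).add (pvM (Int.ModEq.refl 1) (Int.ModEq.refl 2))
      · apply pvA_out
        rw [show pvSm A (0 + 2) = A.getD 1 0 * (1 * 2) + A.getD 0 0 from by
            rw [show (0 + 2 : Nat) = 2 from rfl, pvSm_two]; ring]
        exact (pvM (Int.ModEq.refl _) (pvM (Int.ModEq.refl _) (Int.ModEq.refl _))).add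
          (Int.ModEq.refl _)
  | succ t ih =>
      have hcast : ((t + 1 + 2 : Nat) : Int) = ((t + 2 : Nat) : Int) + 1 := by push_cast; ring
      rw [hcast, PySem.List.pyRange_one_succ_right (by exact_mod_cast by omega),
          List.foldl_append, ih]
      simp only [List.foldl_cons, List.foldl_nil, PySem.List.pyGetD_natCast]
      simp only [Prod.mk.injEq]
      refine ⟨?_, ?_, ?_, ?_⟩
      · apply pvA_out
        rw [show pvSx A (t + 1 + 2) = (pvSx A (t + 2) + A.getD (t + 2) 0 * 2 ^ (t + 1))
              + (pvSx A (t + 2) + (pvSm A (t + 2)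
                + A.getD (t + 2) 0 * (2 ^ (t + 2) - 1 + 2 ^ (t + 1)))) from by
            rw [show t + 1 + 2 = t + 3 from rfl, pvSx_succ']; ring]
        exact (Int.ModEq.add (pvA (pvR _) (pvM (Int.ModEq.refl _) (pvR _)))
          (pvA (pvR _) (pvA (pvR _) (pvM (Int.ModEq.refl _) (pvA (pvR _) (pvR _))))))
      · apply pvM_out
        rw [show (2 : Int) ^ (t + 1 + 1) = 2 ^ (t + 1) * 2 from by ring]
        exact (pvR _).mul (Int.ModEq.refl 2)
      · apply pvA_out
        rw [show (2 : Int) ^ (t + 1 + 2) - 1 = (2 ^ (t + 2) - 1) + 2 ^ (t + 1) * 2 from by ring]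
        exact (pvR _).add (pvM (pvR _) (Int.ModEq.refl 2))
      · apply pvA_out
        rw [show pvSm A (t + 1 + 2) = A.getD (t + 2) 0 * (2 ^ (t + 1) * 2) + pvSm A (t + 2) from by
            rw [show t + 1 + 2 = t + 3 from rfl, pvSm_succ']; ring]
        exact (pvM (Int.ModEq.refl _) (pvM (pvR _) (Int.ModEq.refl 2))).add (pvR _)

lemma pieces_eq (A : List Int) (t : Nat) (h : A.length = t + 2) :
    pieces A = pvSx A (t + 2) % pvMOD := by
  simp only [pieces, h]
  rw [if_neg (by simp; omega)]
  rw [loopA_inv A t]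

lemma pvLast (xs : List Int) (h : xs ≠ []) :
    PySem.List.pyGetD xs (-1) 0 = xs.getD (xs.length - 1) 0 := by
  unfold PySem.List.pyGetD PySem.List.pyGet? PySem.List.pyIdx?
  have hl : 0 < xs.length := List.length_pos_iff.mpr h
  rw [if_neg (by omega), if_pos (by exact_mod_cast by omega : -(xs.length : Int) ≤ -1)]
  simp [List.getD_eq_getElem?_getD]

lemma pwInv (k : Nat) :
    (PySem.List.pyRange 0 (k : Int)).foldl
      (fun pw _ => pw ++ [PySem.Int.mod (PySem.List.pyGetD pw (-1) 0 * 2) pvMOD]) [1]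
    = (List.range (k + 1)).map (fun t => (2 : Int) ^ t % pvMOD) := by
  induction k with
  | zero =>
      have hr : PySem.List.pyRange 0 ((0 : Nat) : Int) = [] := by decide
      rw [hr]
      simp only [List.foldl_nil]
      norm_num [pvMOD]
  | succ k ih =>
      have hcast : ((k + 1 : Nat) : Int) = ((k : Nat) : Int) + 1 := by push_cast; ring
      rw [hcast, PySem.List.pyRange_one_succ_right (by exact_mod_cast Nat.zero_le k),
          List.foldl_append, ih]
      simp only [List.foldl_cons, List.foldl_nil]
      have hne : (List.range (k + 1)).map (fun t => (2 : Int) ^ t % pvMOD) ≠ [] := by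
        simp
      rw [pvLast _ hne]
      have hlen : ((List.range (k + 1)).map (fun t => (2 : Int) ^ t % pvMOD)).length - 1 = k := by
        simp
      rw [hlen, PySem.List.getD_map_range _ _ _ _ (by omega)]
      rw [List.range_succ (n := k + 1), List.map_append]
      congr 1
      simp only [List.map_cons, List.map_nil]
      congr 1
      rw [PySem.Int.mod_eq_emod_of_pos pvMOD_pos]
      have : ((2 : Int) ^ k % pvMOD * 2) % pvMOD = ((2 : Int) ^ k * 2) % pvMOD :=
        Int.ModEq.mul_right 2 (pvR _)
      rw [this]
      congr 1

lemma sum_mod_congr (l : List Nat) (f g : Nat → Int)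
    (h : ∀ x ∈ l, f x % pvMOD = g x % pvMOD) :
    ((l.map f).sum) % pvMOD = ((l.map g).sum) % pvMOD := by
  induction l with
  | nil => rfl
  | cons a l ih =>
      simp only [List.map_cons, List.sum_cons]
      rw [Int.add_emod, h a (by simp), ih (fun x hx => h x (by simp [hx])), ← Int.add_emod]

lemma pieces_alt_eq (A : List Int) (t : Nat) (h : A.length = t + 2) :
    pieces_alt A = pvSx A (t + 2) % pvMOD := by
  simp only [pieces_alt, h]
  rw [if_neg (by simp; omega)]
  rw [pwInv (t + 2)]
  rw [PySem.List.foldl_add]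
  rw [PySem.List.pyRange_zero_natCast, List.map_map, zero_add]
  rw [PySem.Int.mod_eq_emod_of_pos pvMOD_pos]
  unfold pvSx
  apply sum_mod_congr
  intro j hj
  have hjlt : j < t + 2 := List.mem_range.mp hj
  simp only [Function.comp]
  rw [PySem.List.pyGetD_natCast]
  rw [show ((t + 2 : Nat) : Int) - 1 = ((t + 1 : Nat) : Int) from by push_cast; ring]
  rw [show ((t + 1 : Nat) : Int) - (j : Int) = ((t + 1 - j : Nat) : Int) from by omega]
  rw [PySem.List.pyGetD_natCast, PySem.List.pyGetD_natCast, PySem.List.pyGetD_natCast,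
      PySem.List.pyGetD_natCast]
  rw [PySem.List.getD_map_range _ _ _ _ (by omega), PySem.List.getD_map_range _ _ _ _ (by omega),
      PySem.List.getD_map_range _ _ _ _ (by omega), PySem.List.getD_map_range _ _ _ _ (by omega)]
  have hcong : Int.ModEq pvMOD
      (A.getD j 0 * ((2 : Int) ^ (t + 2) % pvMOD + (2 : Int) ^ (t + 1) % pvMOD
        - (2 : Int) ^ (t + 1 - j) % pvMOD - (2 : Int) ^ j % pvMOD))
      (A.getD j 0 * pvC (t + 2) j) := by
    refine Int.ModEq.mul_left _ ?_
    have : pvC (t + 2) j = 2 ^ (t + 2) + 2 ^ (t + 1) - 2 ^ (t + 1 - j) - 2 ^ j := rfl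
    rw [this]
    exact (((pvR _).add (pvR _)).sub (pvR _)).sub (pvR _)
  exact hcong

-- ===== VERDICT (by name: the statement is the Claim_ definition above) =====
theorem pieces_spec : Claim_equal_pieces := by
  intro A _
  unfold Spec_pieces
  match A with
  | [] => rfl
  | [a] => rfl
  | a :: b :: rest =>
      rw [pieces_eq _ rest.length (by simp), pieces_alt_eq _ rest.length (by simp)]
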